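-- pv_equiv track=rewrite | github.com/paikwiki/python-programmers | quizzes/c30l133499.py | solution
-- ===== SOURCE A (Python) =====
-- def solution(babbling):
--     words = ["aya", "ye", "woo", "ma"]
--
--     count = 0
--     for babble in babbling:
--         idx = 0
--         previous = available = None
--         while idx < len(babble) and available is None:
--             for word in words:
--                 if babble[idx:].startswith(word):
--                     if previous == word:
--                         available = False
--                     else:
--                         previous = word
--                         idx = idx + len(word)
--                         if idx == len(babble):
--                             available = True
--                     break
--             else:
--                 break
--
--         if available == True:
--             count = count + 1
--
--     return count
-- ===== SOURCE B (Python) =====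
-- def solution(babbling):
--     # Character-level incremental automaton: feed one character at a time,
--     # tracking the partial word in progress and the last completed word.
--     words = ("aya", "ye", "woo", "ma")
--
--     count = 0
--     for b in babbling:
--         last = None
--         prog = ""
--         dead = False
--         for c in b:
--             cand = prog + c
--             for w in words:
--                 if w.startswith(cand):
--                     if w == cand:
--                         if last == w:
--                             dead = True
--                         else:
--                             last, prog = w, ""
--                     else:
--                         prog = cand
--                     break
--             else:
--                 dead = True
--             if dead:
--                 break
--         if not dead and prog == "" and last is not None:
--             count += 1
--     return count
-- ===== Notes on version B (the rewrite author's own statement) =====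
-- stated objective: alternative
-- what changed: Replaces A's word-level greedy loop (slicing the string and testing startswith for each word, with previous/available flag state) by a character-level incremental automaton: one pass over the characters, maintaining the partial word in progress and the last completed word, then a final boundary check.
import Mathlib
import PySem

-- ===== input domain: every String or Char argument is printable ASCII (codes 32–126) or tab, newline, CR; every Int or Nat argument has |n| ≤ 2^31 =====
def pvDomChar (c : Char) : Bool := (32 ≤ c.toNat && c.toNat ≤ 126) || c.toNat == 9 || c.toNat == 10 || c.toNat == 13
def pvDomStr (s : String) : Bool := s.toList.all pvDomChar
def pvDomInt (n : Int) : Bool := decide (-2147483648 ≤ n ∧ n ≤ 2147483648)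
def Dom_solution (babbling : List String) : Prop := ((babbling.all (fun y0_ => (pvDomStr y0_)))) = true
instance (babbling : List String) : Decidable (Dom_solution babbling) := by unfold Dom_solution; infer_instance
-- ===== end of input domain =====

-- B replaces A's word-level greedy loop (slice + startswith per word) by a character-level
-- incremental automaton: one character at a time, tracking the partial word in progress and
-- the last completed word (objective: alternative algorithm; return-value equivalence).

-- ===== PORT A =====
-- words = ["aya", "ye", "woo", "ma"], as char lists
def pvWords : List (List Char) := [['a','y','a'], ['y','e'], ['w','o','o'], ['m','a']]

-- the `while idx < len(babble) and available is None` loop, fuel = len + 1 (each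
-- iteration that keeps available = None advances idx by ≥ 2, so fuel never runs out);
-- `for word in words … break / else break` is the first-match scan `find?`;
-- `babble[idx:]` with idx ≥ 0 is `drop idx`.
def pvLoopA (cs : List Char) : Nat → Nat → Option (List Char) → Option Bool → Option Bool
  | 0, _, _, avail => avail
  | fuel + 1, idx, prev, avail =>
    if idx < cs.length ∧ avail = none then
      match pvWords.find? (fun w => PySem.Chars.startswith (cs.drop idx) w) with
      | none => avail  -- for-else: break out of the while loop
      | some w =>
        if prev = some w then
          pvLoopA cs fuel idx prev (some false)
        else
          if idx + w.length = cs.length then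
            pvLoopA cs fuel (idx + w.length) (some w) (some true)
          else
            pvLoopA cs fuel (idx + w.length) (some w) avail
    else avail

def solution (babbling : List String) : Int :=
  babbling.foldl
    (fun count babble =>
      if pvLoopA babble.toList (babble.toList.length + 1) 0 none none = some true then
        count + 1
      else count)
    0

-- ===== PORT B =====
-- the `for c in b` loop; state = (last completed word, partial word in progress);
-- `dead` / `break` = returning none; `w.startswith(cand)` = cand.isPrefixOf w.
def pvScanB : List Char → Option (List Char) → List Char → Option (Option (List Char) × List Char)
  | [], last, prog => some (last, prog)
  | c :: cs, last, prog =>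
    let cand := prog ++ [c]
    match pvWords.find? (fun w => cand.isPrefixOf w) with
    | none => none
    | some w =>
      if w = cand then
        (if last = some w then none else pvScanB cs (some w) [])
      else pvScanB cs last cand

-- `if not dead and prog == "" and last is not None`
def pvOkB (s : String) : Bool :=
  match pvScanB s.toList none [] with
  | some (some _, []) => true
  | _ => false

def solution_alt (babbling : List String) : Int :=
  babbling.foldl (fun count babble => if pvOkB babble then count + 1 else count) 0

-- ===== PRECONDITION & SPEC =====
def Spec_solution (babbling : List String) (out : Int) : Prop := out = solution_alt babbling
instance (babbling : List String) (out : Int) : Decidable (Spec_solution babbling out) := by unfold Spec_solution; infer_instance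

-- ===== CLAIM (what is proved, stated in full; the proofs are below) =====
def Claim_equal_solution : Prop := ∀ (babbling : List String), Dom_solution babbling → Spec_solution babbling (solution babbling)

-- ===== LEMMAS AND PROOFS =====

theorem pvWords_len {w : List Char} (h : w ∈ pvWords) : 2 ≤ w.length := by
  fin_cases h <;> decide

theorem pvLoopA_stop (cs : List Char) (fuel idx : Nat) (prev : Option (List Char)) (b : Bool) :
    pvLoopA cs fuel idx prev (some b) = some b := by
  cases fuel <;> simp [pvLoopA]

-- running the automaton from a boundary through a full word w ∈ pvWords
theorem pvScanB_word (w : List Char) (hw : w ∈ pvWords) (rest : List Char)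
    (last : Option (List Char)) :
    pvScanB (w ++ rest) last [] =
      if last = some w then none else pvScanB rest (some w) [] := by
  fin_cases hw <;> simp [pvScanB, pvWords, List.isPrefixOf]

-- first-completion lemma: a run ending at a boundary must have completed some word,
-- whose remainder after `prog` is a prefix of the scanned characters
theorem pvScanB_complete (cs : List Char) :
    ∀ last prog l, pvScanB cs last prog = some (l, []) →
      cs = [] ∨ ∃ w ∈ pvWords, prog <+: w ∧ (w.drop prog.length) <+: cs := by
  induction cs with
  | nil => intro last prog l _; exact Or.inl rfl
  | cons c cs ih =>
    intro last prog l h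
    simp only [pvScanB] at h
    cases hf : pvWords.find? (fun w => (prog ++ [c]).isPrefixOf w) with
    | none => rw [hf] at h; simp at h
    | some w0 =>
      rw [hf] at h
      have hmem : w0 ∈ pvWords := List.mem_of_find?_eq_some hf
      have hpre : (prog ++ [c]) <+: w0 := by
        have := List.find?_some hf
        exact List.isPrefixOf_iff_prefix.mp this
      by_cases he : w0 = prog ++ [c]
      · refine Or.inr ⟨w0, hmem, ?_, ?_⟩
        · exact he ▸ ⟨[c], rfl⟩
        · rw [he, List.drop_left]
          exact ⟨cs, rfl⟩
      · dsimp only at h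
        rw [if_neg he] at h
        rcases ih last (prog ++ [c]) l h with hnil | ⟨w, hwmem, hwpre, hwdrop⟩
        · subst hnil
          simp [pvScanB] at h
        · refine Or.inr ⟨w, hwmem, (List.prefix_append prog [c]).trans hwpre, ?_⟩
          obtain ⟨t, ht⟩ := hwpre
          have : w.drop prog.length = c :: w.drop (prog ++ [c]).length := by
            rw [← ht, List.append_assoc]
            rw [List.drop_left, ← List.append_assoc, List.drop_left]
            rfl
          rw [this]
          exact (List.cons_prefix_cons).mpr ⟨rfl, hwdrop⟩

-- the key correspondence between A's word-level loop and B's character automaton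
theorem pvKey (cs : List Char) :
    ∀ fuel idx prev, cs.length ≤ fuel + idx → idx ≤ cs.length →
      (idx = cs.length → prev = none) →
      ((pvLoopA cs fuel idx prev none = some true) ↔
        (∃ u, pvScanB (cs.drop idx) prev [] = some (some u, []))) := by
  intro fuel
  induction fuel with
  | zero =>
    intro idx prev h1 h2 h3
    have hidx : idx = cs.length := by omega
    subst hidx
    rw [h3 rfl]
    simp [pvLoopA, pvScanB]
  | succ fuel ih =>
    intro idx prev h1 h2 h3
    by_cases hi : idx < cs.length
    · simp only [pvLoopA, hi, true_and, if_pos]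
      cases hf : pvWords.find? (fun w => PySem.Chars.startswith (cs.drop idx) w) with
      | none =>
        -- no word is a prefix of the remainder: A breaks (None); B can never reach a boundary
        simp only []
        constructor
        · intro h; simp at h
        · rintro ⟨u, hu⟩
          rcases pvScanB_complete (cs.drop idx) prev [] (some u) hu with hnil | ⟨w, hwmem, -, hwdrop⟩
          · have : cs.length - idx = 0 := by simpa using congrArg List.length hnil
            omega
          · have : PySem.Chars.startswith (cs.drop idx) w = true := by
              rw [PySem.Chars.startswith_iff]
              simpa using hwdrop
            have := List.find?_eq_none.mp hf w hwmem
            simp [this] at *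
      | some w =>
        have hwmem : w ∈ pvWords := List.mem_of_find?_eq_some hf
        have hw2 : 2 ≤ w.length := pvWords_len hwmem
        have hpre : w <+: cs.drop idx := by
          have := List.find?_some hf
          exact (PySem.Chars.startswith_iff _ _).mp this
        obtain ⟨rest, hrest⟩ := hpre
        have hrest' : rest = cs.drop (idx + w.length) := by
          have := congrArg (List.drop w.length) hrest
          rw [List.drop_left] at this
          rw [this, List.drop_drop, Nat.add_comm]
        have hsplit : pvScanB (cs.drop idx) prev [] =
            if prev = some w then none else pvScanB (cs.drop (idx + w.length)) (some w) [] := by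
          rw [← hrest, pvScanB_word w hwmem, hrest']
        have hwle : w.length ≤ cs.length - idx := by
          have := congrArg List.length hrest
          simp at this
          omega
        simp only []
        by_cases hp : prev = some w
        · rw [if_pos hp, pvLoopA_stop, hsplit, if_pos hp]
          simp
        · rw [if_neg hp, hsplit, if_neg hp]
          by_cases hend : idx + w.length = cs.length
          · rw [if_pos hend, pvLoopA_stop, hend]
            simp [pvScanB]
          · rw [if_neg hend]
            exact ih (idx + w.length) (some w) (by omega) (by omega) (fun h => absurd h hend)
    · have hidx : idx = cs.length := by omega
      subst hidx
      rw [h3 rfl]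
      simp [pvLoopA, pvScanB]

theorem pvOk_eq (s : String) :
    (pvLoopA s.toList (s.toList.length + 1) 0 none none = some true) ↔ pvOkB s = true := by
  rw [pvKey s.toList (s.toList.length + 1) 0 none (by omega) (by omega)
      (fun h => rfl)]
  unfold pvOkB
  cases hs : pvScanB s.toList none [] with
  | none => simp [hs]
  | some p =>
    obtain ⟨l, pr⟩ := p
    cases l with
    | none => simp [hs]
    | some u =>
      cases pr with
      | nil => simp [hs]
      | cons a b => simp [hs]

theorem pvFoldl_eq (babbling : List String) :
    ∀ (c : Int),
      babbling.foldl
        (fun count babble =>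
          if pvLoopA babble.toList (babble.toList.length + 1) 0 none none = some true then
            count + 1
          else count) c
      = babbling.foldl (fun count babble => if pvOkB babble then count + 1 else count) c := by
  induction babbling with
  | nil => intro c; rfl
  | cons s rest ih =>
    intro c
    simp only [List.foldl]
    by_cases h : pvOkB s = true
    · rw [if_pos ((pvOk_eq s).mpr h), if_pos h, ih]
    · rw [if_neg (fun hc => h ((pvOk_eq s).mp hc)), if_neg h, ih]

-- ===== VERDICT (by name: the statement is the Claim_ definition above) =====
theorem solution_spec : Claim_equal_solution := by
  intro babbling _
  unfold Spec_solution solution solution_alt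
  exact pvFoldl_eq babbling 0
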